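-- pv_equiv track=rewrite | github.com/Kimya-M/compiler-4022 | Tokenizer.py | is_comment
-- ===== SOURCE A (Python) =====
-- def is_comment(token: str):
--     state = 0
--     for char in token:
--         if state == 0:
--             if char == "/":
--                 state = 1
--         elif state == 1:
--             if char == "/":
--                 state = 2
--         elif state == 2:
--             return True
--     return False
-- ===== SOURCE B (Python) =====
-- def is_comment(token: str):
--     i = token.find('/')
--     if i == -1:
--         return False
--     j = token.find('/', i + 1)
--     if j == -1:
--         return False
--     return j < len(token) - 1
-- ===== Notes on version B (the rewrite author's own statement) =====
-- stated objective: simpler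
-- what changed: Replaces the character-by-character 3-state machine with two str.find calls (first slash, then next slash) and a single index comparison against len-1.
import Mathlib
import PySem

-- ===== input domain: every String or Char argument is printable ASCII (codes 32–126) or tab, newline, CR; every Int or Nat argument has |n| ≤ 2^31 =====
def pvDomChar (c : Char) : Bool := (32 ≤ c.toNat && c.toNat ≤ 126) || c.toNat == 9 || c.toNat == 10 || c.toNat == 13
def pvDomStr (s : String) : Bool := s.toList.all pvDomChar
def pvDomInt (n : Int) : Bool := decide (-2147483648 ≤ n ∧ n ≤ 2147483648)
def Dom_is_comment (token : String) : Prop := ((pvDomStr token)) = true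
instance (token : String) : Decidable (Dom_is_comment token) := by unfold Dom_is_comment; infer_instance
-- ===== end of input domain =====

-- B replaces A's one-pass state machine by two explicit substring searches (str.find), a simpler decomposition of the same rule.

-- ===== PORT A =====
-- literal port of A's for-loop with its 3-state variable; the early 'return True' in state 2 ends the recursion
def isCommentLoop : List Char → Nat → Bool
  | [], _ => false
  | c :: rest, state =>
    if state = 0 then isCommentLoop rest (if c = '/' then 1 else 0)
    else if state = 1 then isCommentLoop rest (if c = '/' then 2 else 1)
    else true

def is_comment (token : String) : Bool := isCommentLoop token.toList 0

-- ===== PORT B =====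
def is_comment_alt (token : String) : Bool :=
  let i := PySem.Str.find token "/"
  if i = -1 then false
  else
    let j := PySem.Str.findFrom token "/" (i + 1)
    if j = -1 then false
    else decide (j < PySem.Str.len token - 1)

-- ===== PRECONDITION & SPEC =====
def Spec_is_comment (token : String) (out : Bool) : Prop := out = is_comment_alt token
instance (token : String) (out : Bool) : Decidable (Spec_is_comment token out) := by unfold Spec_is_comment; infer_instance

-- ===== CLAIM (what is proved, stated in full; the proofs are below) =====
def Claim_equal_is_comment : Prop := ∀ (token : String), Dom_is_comment token → Spec_is_comment token (is_comment token)

-- ===== LEMMAS AND PROOFS =====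

-- both programs decide this proposition: two slashes at positions i < j with j not the last index
def SlashSpec (cs : List Char) : Prop :=
  ∃ i j, i < j ∧ j + 1 < cs.length ∧ cs[i]? = some '/' ∧ cs[j]? = some '/'

theorem singleton_prefix (a : Char) (l : List Char) : [a] <+: l ↔ l.head? = some a := by
  cases l <;> simp [eq_comm]

theorem slashAt (cs : List Char) (k : ℕ) : ['/'] <+: cs.drop k ↔ cs[k]? = some '/' := by
  rw [singleton_prefix, List.head?_drop]

theorem loop2_iff (cs : List Char) : isCommentLoop cs 2 = true ↔ cs ≠ [] := by
  cases cs <;> simp [isCommentLoop]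

theorem loop1_iff (cs : List Char) :
    isCommentLoop cs 1 = true ↔ ∃ j, j + 1 < cs.length ∧ cs[j]? = some '/' := by
  induction cs with
  | nil => simp [isCommentLoop]
  | cons c r ih =>
    by_cases hc : c = '/'
    · subst hc
      rw [show isCommentLoop ('/' :: r) 1 = isCommentLoop r 2 from by simp [isCommentLoop],
        loop2_iff]
      constructor
      · intro h
        exact ⟨0, by simpa using List.length_pos_of_ne_nil h, by simp⟩
      · rintro ⟨j, hj, -⟩
        intro hr; subst hr; simp at hj
    · rw [show isCommentLoop (c :: r) 1 = isCommentLoop r 1 from by simp [isCommentLoop, hc], ih]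
      constructor
      · rintro ⟨j, hj, hg⟩
        exact ⟨j + 1, by simpa using hj, by simpa using hg⟩
      · rintro ⟨j, hj, hg⟩
        cases j with
        | zero => simp at hg; exact absurd hg hc
        | succ j' => exact ⟨j', by simpa using hj, by simpa using hg⟩

theorem loop0_iff (cs : List Char) : isCommentLoop cs 0 = true ↔ SlashSpec cs := by
  induction cs with
  | nil => simp [isCommentLoop, SlashSpec]
  | cons c r ih =>
    by_cases hc : c = '/'
    · subst hc
      rw [show isCommentLoop ('/' :: r) 0 = isCommentLoop r 1 from by simp [isCommentLoop],
        loop1_iff]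
      constructor
      · rintro ⟨j, hj, hg⟩
        exact ⟨0, j + 1, by omega, by simpa using hj, by simp, by simpa using hg⟩
      · rintro ⟨i, j, hij, hjl, hi, hj⟩
        cases j with
        | zero => omega
        | succ j' => exact ⟨j', by simpa using hjl, by simpa using hj⟩
    · rw [show isCommentLoop (c :: r) 0 = isCommentLoop r 0 from by simp [isCommentLoop, hc], ih]
      constructor
      · rintro ⟨i, j, hij, hjl, hi, hj⟩
        exact ⟨i + 1, j + 1, by omega, by simpa using hjl, by simpa using hi, by simpa using hj⟩
      · rintro ⟨i, j, hij, hjl, hi, hj⟩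
        cases i with
        | zero => simp at hi; exact absurd hi hc
        | succ i' =>
          cases j with
          | zero => omega
          | succ j' =>
            exact ⟨i', j', by omega, by simpa using hjl, by simpa using hi, by simpa using hj⟩

theorem alt_iff (token : String) : is_comment_alt token = true ↔ SlashSpec token.toList := by
  unfold is_comment_alt
  simp only [PySem.Str.find_eq, PySem.Str.findFrom_eq, show ("/" : String).toList = ['/'] from rfl]
  set cs := token.toList with hcs
  have hlen : PySem.Str.len token = (cs.length : Int) := by simp [PySem.Str.len, hcs]
  by_cases hf : PySem.Chars.find cs ['/'] = -1
  · simp only [hf, reduceIte, Bool.false_eq_true, false_iff]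
    rintro ⟨i, j, hij, hjl, hi, hj⟩
    exact (PySem.Chars.find_eq_neg_one_iff cs ['/']).mp hf
      ((List.singleton_infix_iff '/' cs).mpr (List.mem_of_getElem? hi))
  · have hf0 : 0 ≤ PySem.Chars.find cs ['/'] := by
      have := PySem.Chars.neg_one_le_find cs ['/']; omega
    set fi := (PySem.Chars.find cs ['/']).toNat with hfi
    obtain ⟨hpre, hmin⟩ := PySem.Chars.find_spec (s := cs) (sub := ['/']) hf0
    have hi_get : cs[fi]? = some '/' := (slashAt cs fi).mp hpre
    have hfi_lt : fi < cs.length := (List.getElem?_eq_some_iff.mp hi_get).1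
    have hminA : ∀ i' < fi, ¬ cs[i']? = some '/' :=
      fun i' h hc' => hmin i' h ((slashAt cs i').mpr hc')
    have hk : fi + 1 ≤ cs.length := hfi_lt
    have hcast : PySem.Chars.find cs ['/'] + 1 = ((fi + 1 : ℕ) : Int) := by push_cast; omega
    rw [hcast]
    by_cases hj : PySem.Chars.findFrom cs ['/'] ((fi + 1 : ℕ) : Int) = -1
    · simp only [hf, hj, reduceIte, Bool.false_eq_true, false_iff]
      rintro ⟨i, j, hij, hjl, hgi, hgj⟩
      have hi_ge : fi ≤ i := not_lt.mp fun h => hminA i h hgi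
      have hj_ge : fi + 1 ≤ j := by omega
      apply (PySem.Chars.findFrom_natCast_eq_neg_one_iff cs ['/'] (fi + 1) hk).mp hj
      rw [List.singleton_infix_iff]
      refine List.mem_of_getElem? (i := j - (fi + 1)) ?_
      rw [List.getElem?_drop, show fi + 1 + (j - (fi + 1)) = j from by omega]
      exact hgj
    · obtain ⟨hge, hpre2, hmin2⟩ :=
        PySem.Chars.findFrom_natCast_spec cs ['/'] (fi + 1) hk hj
      set gj := (PySem.Chars.findFrom cs ['/'] ((fi + 1 : ℕ) : Int)).toNat with hgjdef
      have h1 : ((fi + 1 : ℕ) : Int) ≤ PySem.Chars.findFrom cs ['/'] ((fi + 1 : ℕ) : Int) := hge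
      have hfind2 : PySem.Chars.findFrom cs ['/'] ((fi + 1 : ℕ) : Int) = (gj : Int) := by
        rw [hgjdef]; omega
      have hgj_ge : fi + 1 ≤ gj := by rw [hgjdef]; omega
      have hj_get : cs[gj]? = some '/' := (slashAt cs gj).mp hpre2
      have hgj_lt : gj < cs.length := (List.getElem?_eq_some_iff.mp hj_get).1
      have hmin2' : ∀ i', fi + 1 ≤ i' → i' < gj → ¬ cs[i']? = some '/' :=
        fun i' h1 h2 hc' => hmin2 i' h1 h2 ((slashAt cs i').mpr hc')
      simp only [if_neg hf, if_neg hj, hlen, decide_eq_true_eq]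
      rw [hfind2]
      constructor
      · intro h
        exact ⟨fi, gj, by omega, by omega, hi_get, hj_get⟩
      · rintro ⟨i, j, hij, hjl, hgi, hgj'⟩
        have hi_ge : fi ≤ i := not_lt.mp fun h' => hminA i h' hgi
        have hj_ge : fi + 1 ≤ j := by omega
        have : gj ≤ j := not_lt.mp fun h' => hmin2' j hj_ge h' hgj'
        omega

-- ===== VERDICT (by name: the statement is the Claim_ definition above) =====
theorem is_comment_spec : Claim_equal_is_comment := by
  intro token _
  unfold Spec_is_comment
  have h : is_comment token = true ↔ is_comment_alt token = true :=
    (loop0_iff token.toList).trans (alt_iff token).symm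
  cases hA : is_comment token <;> cases hB : is_comment_alt token <;> simp_all
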